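-- pv_equiv track=rewrite | github.com/BublikR/neurosystems_clustering | result/clust_freq.py | clust
-- ===== SOURCE A (Python) =====
-- def clust(X, eps):
--     key = 1
--     clust = {key:[X[0]]}
--     for i in range(len(X)-1):
--         if (X[i+1] - X[i]) <= eps:
--             clust[key].append(X[i+1])
--         else:
--             key += 1
--             clust[key] = [X[i+1]]
--     return clust
-- ===== SOURCE B (Python) =====
-- def clust(X, eps):
--     if not X:
--         return {}
--     breaks = [i + 1 for i in range(len(X) - 1) if X[i + 1] - X[i] > eps]
--     bounds = [0] + breaks + [len(X)]
--     segments = [X[a:b] for a, b in zip(bounds, bounds[1:])]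
--     return {key: seg for key, seg in enumerate(segments, 1)}
-- ===== Notes on version B (the rewrite author's own statement) =====
-- stated objective: alternative
-- what changed: B replaces A's element-by-element dict-appending loop with a boundary-finding pass (break indices where the gap exceeds eps) followed by slicing X into segments and enumerating them from 1.
import Mathlib
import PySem

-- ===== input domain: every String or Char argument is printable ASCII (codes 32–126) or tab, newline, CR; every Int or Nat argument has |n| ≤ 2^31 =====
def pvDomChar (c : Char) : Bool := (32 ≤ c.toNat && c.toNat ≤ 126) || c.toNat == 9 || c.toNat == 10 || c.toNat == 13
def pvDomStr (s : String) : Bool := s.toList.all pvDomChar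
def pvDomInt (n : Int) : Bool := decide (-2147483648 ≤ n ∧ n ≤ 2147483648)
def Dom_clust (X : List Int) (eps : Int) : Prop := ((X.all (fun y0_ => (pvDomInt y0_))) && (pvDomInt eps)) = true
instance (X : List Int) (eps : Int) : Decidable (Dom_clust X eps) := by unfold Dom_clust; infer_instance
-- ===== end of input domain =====

-- B finds the break indices first and slices X into segments, instead of A's element-by-element
-- dict-appending loop; same cost, different decomposition (return value only; A raises on empty X).

-- ===== PORT A =====
def clust (X : List Int) (eps : Int) : List (Int × List Int) :=
  match PySem.List.pyGet? X 0 with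
  | none => []   -- X[0] raises IndexError in Python; excluded by Pre_clust
  | some x0 =>
    let init : Int × PySem.Dict Int (List Int) := (1, PySem.Dict.insert PySem.Dict.empty 1 [x0])
    let fin := (PySem.List.pyRange 0 (PySem.List.len X - 1) 1).foldl
      (fun st i =>
        if PySem.List.pyGetD X (i + 1) 0 - PySem.List.pyGetD X i 0 ≤ eps then
          (st.1, st.2.modify st.1 [] (fun g => g ++ [PySem.List.pyGetD X (i + 1) 0]))
        else
          (st.1 + 1, st.2.insert (st.1 + 1) [PySem.List.pyGetD X (i + 1) 0]))
      init
    fin.2.items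

-- ===== PORT B =====
def clust_alt (X : List Int) (eps : Int) : List (Int × List Int) :=
  if X = [] then []
  else
    let breaks := ((PySem.List.pyRange 0 (PySem.List.len X - 1) 1).filter
        (fun i => decide (eps < PySem.List.pyGetD X (i + 1) 0 - PySem.List.pyGetD X i 0))).map (fun i => i + 1)
    let bounds := [(0 : Int)] ++ breaks ++ [PySem.List.len X]
    let segments := (bounds.zip (bounds.drop 1)).map (fun p => PySem.List.slice X (some p.1) (some p.2))
    PySem.List.enumerate segments 1

-- ===== PRECONDITION & SPEC =====
-- Pre_ excludes only empty X, on which A raises IndexError reading X[0].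
def Pre_clust (X : List Int) (eps : Int) : Prop := X ≠ []
instance (X : List Int) (eps : Int) : Decidable (Pre_clust X eps) := by unfold Pre_clust; infer_instance
def pvWitness_clust : List Int × Int := ([0, 1, 5, 6], 2)

def Spec_clust (X : List Int) (eps : Int) (out : List (Int × List Int)) : Prop := out = clust_alt X eps
instance (X : List Int) (eps : Int) (out : List (Int × List Int)) : Decidable (Spec_clust X eps out) := by unfold Spec_clust; infer_instance

-- ===== CLAIM (what is proved, stated in full; the proofs are below) =====
def Claim_equal_clust : Prop := ∀ (X : List Int) (eps : Int), Dom_clust X eps → Pre_clust X eps → Spec_clust X eps (clust X eps)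

-- ===== LEMMAS AND PROOFS =====

-- The common grouping specification: goA eps acc cur prev ys extends the current group cur
-- (whose last element is prev) through ys, closing a group whenever the gap exceeds eps.
def goA (eps : Int) (acc : List (List Int)) (cur : List Int) (prev : Int) : List Int → List (List Int)
  | [] => acc ++ [cur]
  | y :: ys => if y - prev ≤ eps then goA eps acc (cur ++ [y]) y ys
               else goA eps (acc ++ [cur]) [y] y ys

lemma goA_split (eps : Int) : ∀ (ys : List Int) (prev : Int) (acc : List (List Int)) (cur : List Int),
    goA eps acc cur prev ys = acc ++ goA eps [] cur prev ys := by
  intro ys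
  induction ys with
  | nil => intro prev acc cur; simp [goA]
  | cons y ys ih =>
    intro prev acc cur
    simp only [goA]
    split_ifs with h
    · exact ih y acc (cur ++ [y])
    · simp only [List.nil_append]
      rw [ih y (acc ++ [cur]) [y], ih y [cur] [y]]; simp

lemma goA_cur (eps : Int) : ∀ (ys : List Int) (prev : Int) (c cur : List Int),
    goA eps [] (c ++ cur) prev ys =
      (match goA eps [] cur prev ys with
       | [] => [c]
       | g :: gs => (c ++ g) :: gs) := by
  intro ys
  induction ys with
  | nil => intro prev c cur; simp [goA]
  | cons y ys ih =>
    intro prev c cur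
    simp only [goA]
    split_ifs with h
    · rw [show c ++ cur ++ [y] = c ++ (cur ++ [y]) by simp, ih y c (cur ++ [y])]
    · simp only [List.nil_append]
      rw [goA_split eps ys y [c ++ cur] [y], goA_split eps ys y [cur] [y]]
      simp

-- index-pair fold over range equals fold over adjacent pairs
lemma foldIdxPairs {σ : Type} (f : σ → Int → Int → σ) :
    ∀ (X : List Int) (s : σ),
      (List.range (X.length - 1)).foldl (fun s i => f s (X.getD i 0) (X.getD (i + 1) 0)) s
        = (X.zip X.tail).foldl (fun s p => f s p.1 p.2) s := by
  intro X
  induction X with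
  | nil => intro s; simp
  | cons x xs ih =>
    intro s
    cases xs with
    | nil => simp
    | cons y t =>
      have hlen : (x :: y :: t).length - 1 = t.length + 1 := by simp
      rw [hlen, List.range_succ_eq_map]
      simp only [List.foldl_cons, List.foldl_map]
      have : ∀ (s : σ),
          (List.range t.length).foldl
            (fun s i => f s ((x :: y :: t).getD (i + 1) 0) ((x :: y :: t).getD (i + 1 + 1) 0)) s
          = (List.range ((y :: t).length - 1)).foldl
            (fun s i => f s ((y :: t).getD i 0) ((y :: t).getD (i + 1) 0)) s := by
        intro s; simp
      rw [this, ih]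
      simp

lemma mem_enumerate_fst_lt {α : Type} (accs : List α) (p : Int × α)
    (hp : p ∈ PySem.List.enumerate accs 1) : 1 ≤ p.1 ∧ p.1 ≤ accs.length := by
  rcases (PySem.List.mem_enumerate_iff _ _ _).1 hp with ⟨k, hk, rfl⟩
  show 1 ≤ 1 + (k : Int) ∧ 1 + (k : Int) ≤ (accs.length : Int)
  omega

-- Dict.modify on the last (fresh-keyed) entry rewrites just that entry.
lemma dict_modify_last (l : List (Int × List Int)) (k : Int) (g : List Int)
    (h : ∀ p ∈ l, p.1 ≠ k) (f : List Int → List Int) :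
    (PySem.Dict.mk (l ++ [(k, g)])).modify k [] f = PySem.Dict.mk (l ++ [(k, f g)]) := by
  have hget : (PySem.Dict.mk (l ++ [(k, g)])).get? k = some g := by
    induction l with
    | nil => simp [PySem.Dict.get?_mk_cons]
    | cons p l ih =>
      rw [List.cons_append, PySem.Dict.get?_mk_cons]
      have hne : (p.1 == k) = false := by
        exact beq_eq_false_iff_ne.2 (h p (by simp))
      rw [hne]
      simp only [Bool.false_eq_true, if_false]
      exact ih (fun q hq => h q (by simp [hq]))
  have hcont : (PySem.Dict.mk (l ++ [(k, g)])).contains k = true := by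
    rw [PySem.Dict.contains_eq_isSome_get?, hget]; rfl
  have hgd : (PySem.Dict.mk (l ++ [(k, g)])).getD k [] = g :=
    PySem.Dict.getD_of_get?_eq_some _ [] hget
  unfold PySem.Dict.modify
  rw [hgd]
  apply PySem.Dict.ext
  rw [PySem.Dict.items_insert_of_contains _ _ hcont]
  show (l ++ [(k, g)]).map _ = _
  rw [List.map_append]
  congr 1
  · conv_rhs => rw [← List.map_id l]
    apply List.map_congr_left
    intro p hp
    have : (p.1 == k) = false := beq_eq_false_iff_ne.2 (h p hp)
    simp [this]
  · simp

-- the A-loop invariant: state (key, dict) tracks (closed groups, current group)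
lemma foldA (eps : Int) : ∀ (ys : List Int) (prev : Int) (accs : List (List Int)) (cur : List Int),
    (((prev :: ys).zip ys).foldl
      (fun (st : Int × PySem.Dict Int (List Int)) p =>
        if p.2 - p.1 ≤ eps then (st.1, st.2.modify st.1 [] (fun g => g ++ [p.2]))
        else (st.1 + 1, st.2.insert (st.1 + 1) [p.2]))
      ((accs.length + 1 : Int),
        PySem.Dict.mk (PySem.List.enumerate accs 1 ++ [((accs.length + 1 : Int), cur)]))).2.items
    = PySem.List.enumerate (goA eps accs cur prev ys) 1 := by
  intro ys
  induction ys with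
  | nil =>
    intro prev accs cur
    simp only [List.zip_nil_right, List.foldl_nil, goA]
    show PySem.List.enumerate accs 1 ++ [((accs.length + 1 : Int), cur)] = _
    rw [PySem.List.enumerate_append]
    simp [PySem.List.enumerate, add_comm]
  | cons y ys ih =>
    intro prev accs cur
    have hzip : (prev :: y :: ys).zip (y :: ys) = (prev, y) :: ((y :: ys).zip ys) := by simp
    rw [hzip, List.foldl_cons]
    by_cases h : y - prev ≤ eps
    · rw [if_pos h]
      simp only
      rw [dict_modify_last _ _ _ (fun p hp => by have := mem_enumerate_fst_lt accs p hp; omega)]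
      rw [show PySem.Dict.mk (PySem.List.enumerate accs 1 ++ [((accs.length + 1 : Int), cur ++ [y])])
            = PySem.Dict.mk (PySem.List.enumerate accs 1 ++ [((accs.length + 1 : Int), cur ++ [y])]) from rfl]
      rw [ih y accs (cur ++ [y])]
      simp [goA, h]
    · rw [if_neg h]
      simp only
      have hfresh : (PySem.Dict.mk (PySem.List.enumerate accs 1 ++
          [((accs.length + 1 : Int), cur)])).contains ((accs.length + 1 : Int) + 1) = false := by
        rw [PySem.Dict.contains_mk]
        apply List.any_eq_false.2
        intro p hp
        rcases List.mem_append.1 hp with hl | hr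
        · have := mem_enumerate_fst_lt accs p hl
          simp only [beq_iff_eq]
          omega
        · simp only [List.mem_singleton] at hr
          subst hr
          simp only [beq_iff_eq]
          omega
      have hins := PySem.Dict.items_insert_of_not_contains
        (PySem.Dict.mk (PySem.List.enumerate accs 1 ++ [((accs.length + 1 : Int), cur)]))
        ([y] : List Int) hfresh
      have hrewrite : (PySem.Dict.mk (PySem.List.enumerate accs 1 ++
            [((accs.length + 1 : Int), cur)])).insert ((accs.length + 1 : Int) + 1) [y]
          = PySem.Dict.mk (PySem.List.enumerate (accs ++ [cur]) 1 ++
            [(((accs ++ [cur]).length + 1 : Int), [y])]) := by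
        apply PySem.Dict.ext
        rw [hins]
        show (PySem.List.enumerate accs 1 ++ [((accs.length + 1 : Int), cur)]) ++
              [((accs.length + 1 : Int) + 1, [y])] = _
        rw [PySem.List.enumerate_append]
        simp [PySem.List.enumerate, add_comm, add_assoc]
      rw [hrewrite]
      have hkey : (accs.length + 1 : Int) + 1 = ((accs ++ [cur]).length + 1 : Int) := by
        simp only [List.length_append, List.length_cons, List.length_nil]
        push_cast
        ring
      rw [hkey, ih y (accs ++ [cur]) [y]]
      simp [goA, h]

-- A computes the enumerated grouping
lemma clust_eq_goA (x : Int) (xs : List Int) (eps : Int) :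
    clust (x :: xs) eps = PySem.List.enumerate (goA eps [] [x] x xs) 1 := by
  unfold clust
  rw [PySem.List.pyGet?_zero_cons]
  simp only [PySem.List.len]
  have hlen : ((x :: xs).length : Int) - 1 = (((x :: xs).length - 1 : Nat) : Int) := by
    simp only [List.length_cons]; omega
  rw [hlen, PySem.List.pyRange_zero_natCast]
  rw [List.foldl_map]
  have hbody : ∀ (st : Int × PySem.Dict Int (List Int)) (i : Nat),
      (if PySem.List.pyGetD (x :: xs) ((i : Int) + 1) 0 - PySem.List.pyGetD (x :: xs) (i : Int) 0 ≤ eps then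
          (st.1, st.2.modify st.1 [] (fun g => g ++ [PySem.List.pyGetD (x :: xs) ((i : Int) + 1) 0]))
        else (st.1 + 1, st.2.insert (st.1 + 1) [PySem.List.pyGetD (x :: xs) ((i : Int) + 1) 0]))
      = (if (x :: xs).getD (i + 1) 0 - (x :: xs).getD i 0 ≤ eps then
          (st.1, st.2.modify st.1 [] (fun g => g ++ [(x :: xs).getD (i + 1) 0]))
        else (st.1 + 1, st.2.insert (st.1 + 1) [(x :: xs).getD (i + 1) 0])) := by
    intro st i
    have h1 : ((i : Int) + 1) = ((i + 1 : Nat) : Int) := by push_cast; ring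
    rw [h1, PySem.List.pyGetD_natCast, PySem.List.pyGetD_natCast]
  simp only [hbody]
  rw [foldIdxPairs (fun (st : Int × PySem.Dict Int (List Int)) a b =>
        if b - a ≤ eps then (st.1, st.2.modify st.1 [] (fun g => g ++ [b]))
        else (st.1 + 1, st.2.insert (st.1 + 1) [b]))]
  have hinit : ((1 : Int), (PySem.Dict.empty : PySem.Dict Int (List Int)).insert 1 [x])
      = ((([] : List (List Int)).length + 1 : Int),
         PySem.Dict.mk (PySem.List.enumerate ([] : List (List Int)) 1 ++ [((([] : List (List Int)).length + 1 : Int), [x])])) := by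
    have hd : (PySem.Dict.empty : PySem.Dict Int (List Int)).insert 1 [x]
        = PySem.Dict.mk [((1 : Int), [x])] := by
      apply PySem.Dict.ext
      rw [PySem.Dict.items_insert_of_not_contains _ _ (by simp [PySem.Dict.contains_empty])]
      simp [PySem.Dict.empty]
    simp [PySem.List.enumerate, hd]
  show (((x :: xs).zip xs).foldl _ ((1 : Int), (PySem.Dict.empty : PySem.Dict Int (List Int)).insert 1 [x])).2.items = _
  rw [hinit]
  exact foldA eps xs x [] [x]

-- ===== B side =====

def brks (eps : Int) (X : List Int) : List Nat :=
  ((List.range (X.length - 1)).filter (fun i => decide (eps < X.getD (i + 1) 0 - X.getD i 0))).map (· + 1)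

def walk (X : List Int) : Nat → List Nat → List (List Int)
  | _, [] => []
  | a, b :: bs => ((X.drop a).take (b - a)) :: walk X b bs

lemma zip_walk (X : List Int) : ∀ (bs : List Nat) (a : Nat),
    ((a :: bs).zip ((a :: bs).drop 1)).map (fun p => (X.drop p.1).take (p.2 - p.1)) = walk X a bs := by
  intro bs
  induction bs with
  | nil => intro a; simp [walk]
  | cons b bs ih => intro a; simp only [List.drop_one, List.tail, List.zip_cons_cons, List.map_cons, walk]; rw [← ih b]; simp

lemma clust_alt_eq_walk (X : List Int) (eps : Int) (hne : X ≠ []) :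
    clust_alt X eps = PySem.List.enumerate (walk X 0 (brks eps X ++ [X.length])) 1 := by
  unfold clust_alt
  rw [if_neg hne]
  simp only [PySem.List.len]
  have hlen : ((X.length : Int)) - 1 = ((X.length - 1 : Nat) : Int) := by
    cases X with | nil => exact absurd rfl hne | cons a l => simp only [List.length_cons]; omega
  rw [hlen, PySem.List.pyRange_zero_natCast]
  have hfm : ∀ (l : List Nat) (p : Int → Bool),
      (l.map (fun k : Nat => (k : Int))).filter p = (l.filter (fun n => p ((n : Nat) : Int))).map (fun k : Nat => (k : Int)) := by
    intro l p
    induction l with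
    | nil => simp
    | cons a l ih =>
      simp only [List.map_cons, List.filter_cons]
      by_cases hpa : p (a : Int)
      · simp [hpa, ih]
      · simp [hpa, ih]
  have hfilter : ((List.range (X.length - 1)).map (fun k : Nat => (k : Int))).filter
       (fun i => decide (eps < PySem.List.pyGetD X (i + 1) 0 - PySem.List.pyGetD X i 0))
      = ((List.range (X.length - 1)).filter (fun i => decide (eps < X.getD (i + 1) 0 - X.getD i 0))).map
        (fun k : Nat => (k : Int)) := by
    rw [hfm]
    congr 1
    apply List.filter_congr
    intro i _
    have h1 : ((i : Int) + 1) = ((i + 1 : Nat) : Int) := by push_cast; ring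
    simp only [h1, PySem.List.pyGetD_natCast]
  rw [hfilter, List.map_map]
  have hbounds : [(0 : Int)] ++ (((List.range (X.length - 1)).filter
        (fun i => decide (eps < X.getD (i + 1) 0 - X.getD i 0))).map ((fun i => i + 1) ∘ fun k : Nat => (k : Int)))
        ++ [(X.length : Int)]
      = ((0 :: (brks eps X ++ [X.length])).map (fun k : Nat => (k : Int))) := by
    simp only [brks, List.map_append, List.map_map, List.map_cons, List.cons_append, List.nil_append,
      List.map_nil]
    have hcomp : ((fun i : Int => i + 1) ∘ fun k : Nat => (k : Int))
        = ((fun k : Nat => (k : Int)) ∘ fun x : Nat => x + 1) := by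
      funext k; simp
    rw [hcomp]
    norm_num
  rw [hbounds]
  have hzipmap : ∀ (l : List Nat),
      ((l.map (fun k : Nat => (k : Int))).zip ((l.map (fun k : Nat => (k : Int))).drop 1)).map
          (fun p => PySem.List.slice X (some p.1) (some p.2))
        = ((l.zip (l.drop 1)).map (fun p => (X.drop p.1).take (p.2 - p.1))) := by
    intro l
    rw [← List.map_drop, List.zip_map, List.map_map]
    apply List.map_congr_left
    intro p _
    simp only [Function.comp_apply, Prod.map]
    rw [PySem.List.slice_natCast]
  rw [hzipmap, zip_walk]

lemma brks_cons (eps x y : Int) (t : List Int) :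
    brks eps (x :: y :: t) = (if eps < y - x then [1] else []) ++ (brks eps (y :: t)).map (· + 1) := by
  unfold brks
  have hlen : (x :: y :: t).length - 1 = t.length + 1 := by simp
  have hlen2 : (y :: t).length - 1 = t.length := by simp
  rw [hlen, hlen2, List.range_succ_eq_map]
  rw [List.filter_cons]
  have hmap : (List.map (fun i => i + 1) (List.range t.length)).filter
        (fun i => decide (eps < (x :: y :: t).getD (i + 1) 0 - (x :: y :: t).getD i 0))
      = ((List.range t.length).filter
        (fun i => decide (eps < (y :: t).getD (i + 1) 0 - (y :: t).getD i 0))).map (fun i => i + 1) := by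
    rw [List.filter_map]
    congr 1
  rw [hmap]
  by_cases h : eps < y - x
  · simp only [List.getD_cons_succ, List.getD_cons_zero, h, decide_true, if_pos, List.map_append,
      List.map_map, List.map_cons, List.map_nil]
    simp [List.map_map]
  · simp only [List.getD_cons_succ, List.getD_cons_zero, h, decide_false]
    simp [List.map_map]

lemma walk_shift (x : Int) (xs : List Int) : ∀ (bs : List Nat) (a : Nat),
    walk (x :: xs) (a + 1) (bs.map (· + 1)) = walk xs a bs := by
  intro bs
  induction bs with
  | nil => intro a; simp [walk]
  | cons b bs ih =>
    intro a
    simp only [List.map_cons, walk]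
    rw [ih b]
    congr 1
    simp [Nat.add_sub_add_right]

lemma walk_eq_goA (eps : Int) : ∀ (xs : List Int) (x : Int),
    walk (x :: xs) 0 (brks eps (x :: xs) ++ [(x :: xs).length]) = goA eps [] [x] x xs := by
  intro xs
  induction xs with
  | nil =>
    intro x
    simp [brks, walk, goA]
  | cons y t ih =>
    intro x
    rw [brks_cons]
    by_cases h : eps < y - x
    · rw [if_pos h]
      have hlist : ([1] ++ (brks eps (y :: t)).map (· + 1)) ++ [(x :: y :: t).length]
          = 1 :: ((brks eps (y :: t) ++ [(y :: t).length]).map (· + 1)) := by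
        simp
      rw [hlist]
      show ((x :: y :: t).drop 0).take (1 - 0) :: walk (x :: y :: t) 1 _ = _
      rw [show (1 : Nat) = 0 + 1 from rfl, walk_shift, ih y]
      have hgo : goA eps [] [x] x (y :: t) = goA eps [[x]] [y] y t := by
        simp [goA, show ¬ (y - x ≤ eps) from by omega]
      rw [hgo, goA_split eps t y [[x]] [y]]
      simp [walk]
    · rw [if_neg h]
      simp only [List.nil_append]
      have hgo : goA eps [] [x] x (y :: t) = goA eps [] ([x] ++ [y]) y t := by
        simp [goA, show y - x ≤ eps from by omega]
      rw [hgo, goA_cur eps t y [x] [y]]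
      rw [← ih y]
      have hlist : (brks eps (y :: t)).map (· + 1) ++ [(x :: y :: t).length]
          = ((brks eps (y :: t)) ++ [(y :: t).length]).map (· + 1) := by
        simp
      rw [hlist]
      cases hb : brks eps (y :: t) ++ [(y :: t).length] with
      | nil => exact absurd hb (by simp)
      | cons c cs =>
        simp only [List.map_cons, walk]
        rw [show c + 1 = c + 1 from rfl]
        have hshift : walk (x :: y :: t) (c + 1) (cs.map (· + 1)) = walk (y :: t) c cs :=
          walk_shift x (y :: t) cs c
        rw [hshift]
        have htake : ((x :: y :: t).drop 0).take (c + 1 - 0) = x :: ((y :: t).drop 0).take (c - 0) := by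
          simp [List.take_succ_cons]
        rw [htake]
        rfl

-- ===== VERDICT (by name: the statement is the Claim_ definition above) =====
theorem clust_spec : Claim_equal_clust := by
  intro X eps hdom hpre
  unfold Spec_clust
  cases X with
  | nil => exact absurd rfl hpre
  | cons x xs =>
    rw [clust_eq_goA, clust_alt_eq_walk _ _ (by simp), walk_eq_goA]
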